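-- pv_equiv track=rewrite | github.com/ozayn/flashcards | apps/api/app/core/gen_job_context.py | _cards_provider_final
-- ===== SOURCE A (Python) =====
-- def _cards_provider_final(counts: dict[str, int], order: list[str]) -> str | None:
--     """Provider that produced the most successful card-prep completions; tie → earliest such in time order."""
--     if not counts:
--         return None
--     max_n = max(counts.values())
--     candidates = [pr for pr, n in counts.items() if n == max_n]
--     if len(candidates) == 1:
--         return candidates[0]
--     for pr in order:
--         if pr in candidates:
--             return pr
--     return candidates[0]
-- ===== SOURCE B (Python) =====
-- def _cards_provider_final(counts: dict[str, int], order: list[str]) -> str | None: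
--     """Provider that produced the most successful card-prep completions; tie → earliest such in time order."""
--     if not counts:
--         return None
--     max_n = max(counts.values())
--     pos = {}
--     for i, pr in enumerate(order):
--         pos.setdefault(pr, i)
--     default = len(order)
--     best = None
--     best_pos = default + 1
--     for pr, n in counts.items():
--         if n == max_n:
--             p = pos.get(pr, default)
--             if p < best_pos:
--                 best, best_pos = pr, p
--     return best
-- ===== Notes on version B (the rewrite author's own statement) =====
-- stated objective: alternative
-- what changed: Replaces the candidates list, the len==1 short-circuit and the per-candidate membership scan over order with a first-occurrence position index built once over order plus a single argmin pass over counts (strict < keeps counts-order tie-breaking and the absent-from-order fallback).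
import Mathlib
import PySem

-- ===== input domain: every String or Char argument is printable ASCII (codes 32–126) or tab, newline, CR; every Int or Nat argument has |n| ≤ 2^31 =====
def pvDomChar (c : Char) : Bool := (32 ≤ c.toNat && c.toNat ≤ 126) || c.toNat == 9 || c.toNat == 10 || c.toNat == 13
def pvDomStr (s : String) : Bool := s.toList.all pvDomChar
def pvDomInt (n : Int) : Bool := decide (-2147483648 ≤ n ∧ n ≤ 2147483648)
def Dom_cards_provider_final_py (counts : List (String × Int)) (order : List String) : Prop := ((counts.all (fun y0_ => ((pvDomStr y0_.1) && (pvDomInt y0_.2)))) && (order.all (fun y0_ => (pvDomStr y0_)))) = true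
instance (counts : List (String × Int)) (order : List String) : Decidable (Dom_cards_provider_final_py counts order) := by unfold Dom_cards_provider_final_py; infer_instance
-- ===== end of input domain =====

-- B replaces A's candidates list and per-candidate scan of `order` by a first-occurrence
-- position index over `order` plus one strict-< argmin pass over `counts` (alternative decomposition).

-- ===== PORT A =====
def cards_provider_final_py (counts : List (String × Int)) (order : List String) : Option String :=
  if counts.isEmpty then none
  else
    match PySem.List.max? (counts.map Prod.snd) (fun x => x) with
    | none => none  -- unreachable: counts nonempty
    | some max_n =>
      let candidates := (counts.filter (fun p => p.2 == max_n)).map Prod.fst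
      if candidates.length == 1 then
        PySem.List.pyGet? candidates 0
      else
        match order.find? (fun pr => candidates.contains pr) with
        | some pr => some pr
        | none => PySem.List.pyGet? candidates 0

-- ===== PORT B =====
def cards_provider_final_py_alt (counts : List (String × Int)) (order : List String) : Option String :=
  if counts.isEmpty then none
  else
    match PySem.List.max? (counts.map Prod.snd) (fun x => x) with
    | none => none  -- unreachable: counts nonempty
    | some max_n =>
      let pos := (PySem.List.enumerate order 0).foldl
        (fun d p => d.setdefault p.2 p.1) (PySem.Dict.empty : PySem.Dict String Int)
      let dflt : Int := (order.length : Int)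
      (counts.foldl
        (fun st p =>
          if p.2 == max_n then
            let q := pos.getD p.1 dflt
            if q < st.2 then (some p.1, q) else st
          else st)
        ((none : Option String), dflt + 1)).1

-- ===== PRECONDITION & SPEC =====
def Spec_cards_provider_final_py (counts : List (String × Int)) (order : List String) (out : Option String) : Prop := out = cards_provider_final_py_alt counts order
instance (counts : List (String × Int)) (order : List String) (out : Option String) : Decidable (Spec_cards_provider_final_py counts order out) := by unfold Spec_cards_provider_final_py; infer_instance

-- ===== CLAIM (what is proved, stated in full; the proofs are below) =====
def Claim_equal_cards_provider_final_py : Prop := ∀ (counts : List (String × Int)) (order : List String), Dom_cards_provider_final_py counts order → Spec_cards_provider_final_py counts order (cards_provider_final_py counts order)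

-- ===== LEMMAS AND PROOFS =====

-- first element of `cs` (first-in-counts-order) achieving the minimal `order`-position below p0
def pvArgmin (order : List String) : List String → Int → Option String
  | [], _ => none
  | x :: xs, p0 =>
      if (List.idxOf x order : Int) < p0 then
        some ((pvArgmin order xs (List.idxOf x order : Int)).getD x)
      else pvArgmin order xs p0

lemma pos_build_getD (pr : String) (order : List String) :
    ∀ (s : Int) (d : PySem.Dict String Int) (dflt : Int),
    ((PySem.List.enumerate order s).foldl (fun d p => d.setdefault p.2 p.1) d).getD pr dflt
      = if d.contains pr then d.getD pr dflt
        else if pr ∈ order then s + (List.idxOf pr order : Int) else dflt := by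
  induction order with
  | nil =>
    intro s d dflt
    simp only [PySem.List.enumerate_nil, List.foldl_nil]
    cases hd : d.contains pr with
    | true => simp
    | false => simp only [Bool.false_eq_true, if_false]
               exact PySem.Dict.getD_of_not_contains d dflt hd
  | cons x xs ih =>
    intro s d dflt
    rw [PySem.List.enumerate_cons, List.foldl_cons]
    simp only []
    rw [ih]
    by_cases hpx : pr = x
    · subst hpx
      rw [PySem.Dict.contains_setdefault]
      simp only [BEq.rfl, Bool.true_or, if_true]
      rw [PySem.Dict.getD_setdefault_self]
      cases hd : d.contains pr with
      | true =>
        simp only [if_true]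
        rw [PySem.Dict.contains_eq_isSome_get?] at hd
        cases hg : d.get? pr with
        | none => rw [hg] at hd; simp at hd
        | some v =>
          rw [PySem.Dict.getD_eq_get?_getD, PySem.Dict.getD_eq_get?_getD, hg]
          rfl
      | false =>
        simp only [Bool.false_eq_true, if_false]
        rw [PySem.Dict.getD_of_not_contains d s hd]
        simp
    · rw [PySem.Dict.contains_setdefault]
      have hbeq : (pr == x) = false := by simp [hpx]
      rw [hbeq, Bool.false_or]
      have hgd : (d.setdefault x s).getD pr dflt = d.getD pr dflt := by
        rw [PySem.Dict.getD_eq_get?_getD, PySem.Dict.get?_setdefault_of_ne d s hpx,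
          ← PySem.Dict.getD_eq_get?_getD]
      rw [hgd]
      cases hd : d.contains pr with
      | true => simp
      | false =>
        simp only [Bool.false_eq_true, if_false]
        have hmem : (pr ∈ x :: xs) ↔ (pr ∈ xs) := by simp [hpx]
        have hidx : List.idxOf pr (x :: xs) = List.idxOf pr xs + 1 := by
          rw [List.idxOf_cons]
          have : (x == pr) = false := by simp [Ne.symm hpx]
          rw [this]
          simp
        by_cases hm : pr ∈ xs
        · simp only [hmem.mpr hm, hm, if_true, hidx]
          push_cast
          ring
        · simp [hm]
          intro h
          exact absurd h hpx

lemma pos_getD_final (order : List String) (pr : String) :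
    ((PySem.List.enumerate order 0).foldl (fun d p => d.setdefault p.2 p.1)
        (PySem.Dict.empty : PySem.Dict String Int)).getD pr (order.length : Int)
      = (List.idxOf pr order : Int) := by
  rw [pos_build_getD]
  rw [PySem.Dict.contains_empty]
  simp only [Bool.false_eq_true, if_false]
  by_cases hm : pr ∈ order
  · simp [hm]
  · simp [hm]

lemma foldl_sel (order : List String) :
    ∀ (cs : List String) (b0 : Option String) (p0 : Int),
    cs.foldl (fun st x =>
        if (List.idxOf x order : Int) < st.2 then (some x, (List.idxOf x order : Int)) else st)
      (b0, p0)
      = match pvArgmin order cs p0 with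
        | none => (b0, p0)
        | some y => (some y, (List.idxOf y order : Int)) := by
  intro cs
  induction cs with
  | nil => intro b0 p0; simp [pvArgmin]
  | cons x xs ih =>
    intro b0 p0
    have hA : pvArgmin order (x :: xs) p0
        = if (List.idxOf x order : Int) < p0 then
            some ((pvArgmin order xs (List.idxOf x order : Int)).getD x)
          else pvArgmin order xs p0 := rfl
    rw [hA]
    simp only [List.foldl_cons]
    by_cases h : (List.idxOf x order : Int) < p0
    · rw [if_pos h, if_pos h, ih]
      cases harg : pvArgmin order xs (List.idxOf x order : Int) with
      | none => simp
      | some y => simp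
    · rw [if_neg h, if_neg h]
      exact ih b0 p0

lemma pvArgmin_mem (order : List String) :
    ∀ (cs : List String) (p0 : Int) (y : String),
    pvArgmin order cs p0 = some y → y ∈ cs ∧ (List.idxOf y order : Int) < p0 := by
  intro cs
  induction cs with
  | nil => intro p0 y h; simp [pvArgmin] at h
  | cons x xs ih =>
    intro p0 y h
    simp only [pvArgmin] at h
    by_cases hx : (List.idxOf x order : Int) < p0
    · rw [if_pos hx] at h
      cases harg : pvArgmin order xs (List.idxOf x order : Int) with
      | none => rw [harg] at h; simp at h; subst h; exact ⟨List.mem_cons_self, hx⟩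
      | some z =>
        rw [harg] at h; simp at h; subst h
        obtain ⟨hz, hlt⟩ := ih _ _ harg
        exact ⟨List.mem_cons_of_mem _ hz, lt_trans hlt hx⟩
    · rw [if_neg hx] at h
      obtain ⟨hz, hlt⟩ := ih _ _ h
      exact ⟨List.mem_cons_of_mem _ hz, hlt⟩

lemma pvArgmin_none (order : List String) :
    ∀ (cs : List String) (p0 : Int),
    pvArgmin order cs p0 = none → ∀ x ∈ cs, p0 ≤ (List.idxOf x order : Int) := by
  intro cs
  induction cs with
  | nil => intro p0 _ x hx; simp at hx
  | cons c xs ih =>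
    intro p0 h x hx
    simp only [pvArgmin] at h
    by_cases hc : (List.idxOf c order : Int) < p0
    · rw [if_pos hc] at h; simp at h
    · rw [if_neg hc] at h
      rcases List.mem_cons.mp hx with rfl | hx'
      · omega
      · exact ih _ h x hx'

lemma pvArgmin_min (order : List String) :
    ∀ (cs : List String) (p0 : Int) (y : String),
    pvArgmin order cs p0 = some y →
    ∀ x ∈ cs, (List.idxOf y order : Int) ≤ (List.idxOf x order : Int) := by
  intro cs
  induction cs with
  | nil => intro p0 y h; simp [pvArgmin] at h
  | cons c xs ih =>
    intro p0 y h x hx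
    simp only [pvArgmin] at h
    by_cases hc : (List.idxOf c order : Int) < p0
    · rw [if_pos hc] at h
      cases harg : pvArgmin order xs (List.idxOf c order : Int) with
      | none =>
        rw [harg] at h; simp at h; subst h
        rcases List.mem_cons.mp hx with rfl | hx'
        · exact le_refl _
        · exact pvArgmin_none order xs _ harg x hx'
      | some z =>
        rw [harg] at h; simp at h; subst h
        have hzlt := (pvArgmin_mem order xs _ _ harg).2
        rcases List.mem_cons.mp hx with rfl | hx'
        · exact le_of_lt hzlt
        · exact ih _ _ harg x hx'
    · rw [if_neg hc] at h
      have hylt := (pvArgmin_mem order xs _ _ h).2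
      rcases List.mem_cons.mp hx with rfl | hx'
      · omega
      · exact ih _ _ h x hx'

lemma pvArgmin_isSome (order : List String) (c : String) (cs : List String) :
    ∃ y, pvArgmin order (c :: cs) ((order.length : Int) + 1) = some y := by
  simp only [pvArgmin]
  have hle : (List.idxOf c order : Int) < (order.length : Int) + 1 := by
    have := List.idxOf_le_length (l := order) (a := c)
    omega
  rw [if_pos hle]
  exact ⟨_, rfl⟩

lemma sel_eq_find (order : List String) (cs : List String) (hne : cs ≠ []) :
    pvArgmin order cs ((order.length : Int) + 1)
      = match order.find? (fun pr => cs.contains pr) with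
        | some pr => some pr
        | none => cs.head? := by
  cases cs with
  | nil => exact absurd rfl hne
  | cons c cs' =>
    obtain ⟨y, hy⟩ := pvArgmin_isSome order c cs'
    cases hfind : order.find? (fun pr => (c :: cs').contains pr) with
    | none =>
      have hnone : ∀ x ∈ c :: cs', x ∉ order := by
        intro x hx hxo
        have h2 := List.find?_eq_none.mp hfind x hxo
        rw [List.contains_iff_mem] at h2
        exact h2 hx
      have hall : ∀ x ∈ c :: cs', List.idxOf x order = order.length := fun x hx =>
        List.idxOf_eq_length (hnone x hx)
      simp only [pvArgmin]
      have hc := hall c List.mem_cons_self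
      have hlt : (List.idxOf c order : Int) < (order.length : Int) + 1 := by rw [hc]; omega
      rw [if_pos hlt]
      have hsub : pvArgmin order cs' (List.idxOf c order : Int) = none := by
        cases hsub : pvArgmin order cs' (List.idxOf c order : Int) with
        | none => rfl
        | some z =>
          obtain ⟨hz, hzlt⟩ := pvArgmin_mem order cs' _ _ hsub
          rw [hall z (List.mem_cons_of_mem _ hz), hc] at hzlt
          omega
      rw [hsub]
      rfl
    | some pr =>
      rw [hy]
      obtain ⟨hprc, as, bs, hord, has⟩ := List.find?_eq_some_iff_append.mp hfind
      have hprmem : pr ∈ c :: cs' := by simpa using hprc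
      have hnotin : ∀ a ∈ as, a ∉ (c :: cs') := by
        intro a ha
        have := has a ha
        simpa using this
      have hprnas : pr ∉ as := fun h => hnotin pr h hprmem
      obtain ⟨hymem, _⟩ := pvArgmin_mem order _ _ _ hy
      have hynas : y ∉ as := fun h => hnotin y h hymem
      have hidxpr : List.idxOf pr order = as.length := by
        rw [hord, List.idxOf_append, if_neg hprnas, List.idxOf_cons]
        simp
      have hidxy : List.idxOf y order = List.idxOf y (pr :: bs) + as.length := by
        rw [hord, List.idxOf_append, if_neg hynas]
      have hmin := pvArgmin_min order _ _ _ hy pr hprmem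
      rw [hidxpr, hidxy] at hmin
      have hzero : List.idxOf y (pr :: bs) = 0 := by omega
      have : pr = y := by
        by_contra hne'
        rw [List.idxOf_cons] at hzero
        have hb : (pr == y) = false := by simp [hne']
        rw [hb] at hzero
        simp at hzero
      rw [this]

lemma pyGet?_zero_head? (cs : List String) : PySem.List.pyGet? cs 0 = cs.head? := by
  cases cs <;> simp [PySem.List.pyGet?, PySem.List.pyIdx?]

lemma a_branch_eq (order : List String) (cs : List String) (hne : cs ≠ []) :
    (if cs.length == 1 then PySem.List.pyGet? cs 0
     else match order.find? (fun pr => cs.contains pr) with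
          | some pr => some pr
          | none => PySem.List.pyGet? cs 0)
      = match order.find? (fun pr => cs.contains pr) with
        | some pr => some pr
        | none => cs.head? := by
  by_cases hlen : cs.length = 1
  · obtain ⟨x, rfl⟩ := List.length_eq_one_iff.mp hlen
    simp only [hlen, BEq.rfl, if_true]
    cases hfind : order.find? (fun pr => [x].contains pr) with
    | none => exact pyGet?_zero_head? [x]
    | some pr =>
      have hprc := List.find?_some hfind
      have : pr = x := by simpa using hprc
      subst this
      exact pyGet?_zero_head? [pr]
  · have : (cs.length == 1) = false := by simp [hlen]
    rw [this]
    simp only [Bool.false_eq_true, if_false]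
    rw [pyGet?_zero_head?]

-- ===== VERDICT (by name: the statement is the Claim_ definition above) =====
theorem cards_provider_final_py_spec : Claim_equal_cards_provider_final_py := by
  unfold Claim_equal_cards_provider_final_py
  intro counts order _
  unfold Spec_cards_provider_final_py cards_provider_final_py cards_provider_final_py_alt
  by_cases hE : counts.isEmpty
  · simp [hE]
  · simp only [hE, Bool.false_eq_true, if_false]
    cases hmax : PySem.List.max? (counts.map Prod.snd) (fun x => x) with
    | none => rfl
    | some max_n =>
      simp only []
      -- rewrite B's dictionary lookup to idxOf
      have hpos : ∀ (pr : String),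
          ((PySem.List.enumerate order 0).foldl (fun d p => d.setdefault p.2 p.1)
              (PySem.Dict.empty : PySem.Dict String Int)).getD pr (order.length : Int)
            = (List.idxOf pr order : Int) := pos_getD_final order
      set cs := (counts.filter (fun p => p.2 == max_n)).map Prod.fst with hcs
      have hfold :
          (counts.foldl
            (fun st p =>
              if p.2 == max_n then
                let q := ((PySem.List.enumerate order 0).foldl (fun d p => d.setdefault p.2 p.1)
                    (PySem.Dict.empty : PySem.Dict String Int)).getD p.1 (order.length : Int)
                if q < st.2 then (some p.1, q) else st
              else st)
            ((none : Option String), (order.length : Int) + 1))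
          = cs.foldl (fun st x =>
              if (List.idxOf x order : Int) < st.2 then (some x, (List.idxOf x order : Int)) else st)
            ((none : Option String), (order.length : Int) + 1) := by
        rw [hcs, List.foldl_map, List.foldl_filter]
        apply PySem.List.foldl_congr_mem
        intro st p _
        by_cases hp : (p.2 == max_n) = true
        · rw [if_pos hp, if_pos hp]
          simp only [hpos]
        · rw [if_neg hp, if_neg hp]
      have hne : cs ≠ [] := by
        have hmem := PySem.List.max?_mem hmax
        obtain ⟨p, hpmem, hp2⟩ := List.mem_map.mp hmem
        intro hnil
        have : p.1 ∈ cs := by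
          rw [hcs]
          exact List.mem_map.mpr ⟨p, List.mem_filter.mpr ⟨hpmem, by simp [hp2]⟩, rfl⟩
        rw [hnil] at this
        simp at this
      rw [a_branch_eq order cs hne]
      rw [hfold, foldl_sel order cs, sel_eq_find order cs hne]
      obtain ⟨c, t, hct⟩ : ∃ c t, cs = c :: t := by
        cases hcs' : cs with
        | nil => exact absurd hcs' hne
        | cons c t => exact ⟨c, t, rfl⟩
      cases hfind : order.find? (fun pr => cs.contains pr) with
      | some pr => rfl
      | none => rw [hct]; simp
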